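-- pv_equiv track=rewrite | github.com/kenn12-prog/Rel-f1-HGCond | step3_features convolution.py | generate_metapaths
-- ===== SOURCE A (Python) =====
-- from typing import Dict, List, Tuple
-- from collections import defaultdict
--
-- def generate_metapaths(node_types: List[str], edge_types: List[Tuple[str, str, str]]) -> Dict[str, List[str]]:
--     """
--     Generate length-3 metapaths for each node type
--     Ensures start and end node types are consistent (e.g., A->B->A)
--     Similar to FreeHGC metapath generation logic
--     """
--     metapaths = defaultdict(list)
--
--     # Build adjacency dictionary
--     adjacency = defaultdict(list)
--     for src, rel, dst in edge_types:
--         adjacency[src].append((rel, dst))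
--
--     # Generate metapaths for each node type
--     for node_type in node_types:
--         # Length-3 paths: A -> B -> A (e.g., PAP, APA)
--         if node_type in adjacency:
--             for rel1, mid_type in adjacency[node_type]:
--                 if mid_type in adjacency:
--                     for rel2, end_type in adjacency[mid_type]:
--                         if end_type == node_type:  # Ensure start and end consistency
--                             metapath = f"{node_type}{rel1}{mid_type}{rel2}{end_type}"
--                             metapaths[node_type].append(metapath)
--
--     return metapaths
-- ===== SOURCE B (Python) =====
-- from typing import Dict, List, Tuple
--
-- def generate_metapaths(node_types: List[str], edge_types: List[Tuple[str, str, str]]) -> Dict[str, List[str]]: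
--     """
--     Hash-join re-implementation: index return edges by (source, dest) once,
--     then emit each A->B->A path by a direct lookup, instead of scanning every
--     out-edge of the middle type and filtering by end type.
--     """
--     # return-edge index: (src, dst) -> [rel, ...] in edge order
--     back = {}
--     for (src, dst), rel in [((s, d), r) for s, r, d in edge_types]:
--         back.setdefault((src, dst), []).append(rel)
--
--     # one pass over edges: every path A -r1-> B -r2-> A, grouped by start type
--     paths_by_start = {}
--     for src, rel1, dst in edge_types:
--         for rel2 in back.get((dst, src), []):
--             paths_by_start.setdefault(src, []).append(f"{src}{rel1}{dst}{rel2}{src}")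
--
--     # key order / duplicates follow node_types, as in the original
--     result = {}
--     for nt in node_types:
--         if nt in paths_by_start:
--             result.setdefault(nt, []).extend(paths_by_start[nt])
--     return result
-- ===== Notes on version B (the rewrite author's own statement) =====
-- stated objective: alternative
-- what changed: A rescans every out-edge of each middle type and filters by end type; B builds a (source,dest)->relations hash index once and emits each A->B->A path by a direct hash-join lookup per edge, in one pass over the edges.
import Mathlib
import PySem

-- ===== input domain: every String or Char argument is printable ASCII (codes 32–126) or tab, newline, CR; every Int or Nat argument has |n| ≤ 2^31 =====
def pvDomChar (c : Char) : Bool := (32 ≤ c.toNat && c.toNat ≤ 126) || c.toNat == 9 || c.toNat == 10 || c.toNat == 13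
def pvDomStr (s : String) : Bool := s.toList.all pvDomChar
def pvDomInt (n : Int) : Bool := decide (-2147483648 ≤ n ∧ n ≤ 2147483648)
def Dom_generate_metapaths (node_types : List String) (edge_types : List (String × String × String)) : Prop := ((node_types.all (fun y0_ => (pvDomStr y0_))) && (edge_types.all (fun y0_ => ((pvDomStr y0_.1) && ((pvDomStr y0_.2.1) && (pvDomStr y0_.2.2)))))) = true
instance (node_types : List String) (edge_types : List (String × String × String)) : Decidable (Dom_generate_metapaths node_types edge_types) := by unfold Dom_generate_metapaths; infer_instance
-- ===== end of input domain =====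

-- B replaces A's filtered scan of every out-edge of the middle type by a hash join
-- on a (source, dest) → relations index, emitting each A->B->A path directly.

-- ===== PORT A =====
def generate_metapaths (node_types : List String) (edge_types : List (String × String × String)) : List (String × List String) :=
  -- adjacency = defaultdict(list); adjacency[src].append((rel, dst))
  let adjacency : PySem.Dict String (List (String × String)) :=
    edge_types.foldl (fun d e => d.modify e.1 [] (fun l => l ++ [e.2])) PySem.Dict.empty
  -- metapaths = defaultdict(list); the nested loops of A
  let metapaths : PySem.Dict String (List String) :=
    node_types.foldl (fun m node_type =>
      if adjacency.contains node_type then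
        (adjacency.getD node_type []).foldl (fun m p1 =>
          if adjacency.contains p1.2 then
            (adjacency.getD p1.2 []).foldl (fun m p2 =>
              if p2.2 == node_type then
                m.modify node_type [] (fun l =>
                  l ++ [node_type ++ p1.1 ++ p1.2 ++ p2.1 ++ p2.2])
              else m) m
          else m) m
      else m) PySem.Dict.empty
  metapaths.items

-- ===== PORT B =====
def generate_metapaths_alt (node_types : List String) (edge_types : List (String × String × String)) : List (String × List String) :=
  -- back[(src, dst)].append(rel), looping over the ((src, dst), rel) view of the edges
  let back : PySem.Dict (String × String) (List String) :=
    (edge_types.map (fun e => ((e.1, e.2.2), e.2.1))).foldl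
      (fun d p => d.modify p.1 [] (fun l => l ++ [p.2])) PySem.Dict.empty
  -- one pass over the edges; direct lookup of the matching return relations
  let paths_by_start : PySem.Dict String (List String) :=
    edge_types.foldl (fun d e =>
      (back.getD (e.2.2, e.1) []).foldl (fun d rel2 =>
        d.modify e.1 [] (fun l => l ++ [e.1 ++ e.2.1 ++ e.2.2 ++ rel2 ++ e.1])) d)
      PySem.Dict.empty
  -- result keyed / duplicated in node_types order
  let result : PySem.Dict String (List String) :=
    node_types.foldl (fun m nt =>
      if paths_by_start.contains nt then
        m.modify nt [] (fun l => l ++ paths_by_start.getD nt [])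
      else m) PySem.Dict.empty
  result.items

-- ===== PRECONDITION & SPEC =====
def Spec_generate_metapaths (node_types : List String) (edge_types : List (String × String × String)) (out : List (String × List String)) : Prop := out = generate_metapaths_alt node_types edge_types
instance (node_types : List String) (edge_types : List (String × String × String)) (out : List (String × List String)) : Decidable (Spec_generate_metapaths node_types edge_types out) := by unfold Spec_generate_metapaths; infer_instance

-- ===== CLAIM (what is proved, stated in full; the proofs are below) =====
def Claim_equal_generate_metapaths : Prop := ∀ (node_types : List String) (edge_types : List (String × String × String)), Dom_generate_metapaths node_types edge_types → Spec_generate_metapaths node_types edge_types (generate_metapaths node_types edge_types)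

-- ===== LEMMAS AND PROOFS =====

-- `pvApp k d xs` = the net effect of appending the strings xs one by one under key k
def pvApp {κ ν : Type} [BEq κ] (k : κ) (d : PySem.Dict κ (List ν)) (xs : List ν) :
    PySem.Dict κ (List ν) :=
  if xs = [] then d else d.modify k [] (fun l => l ++ xs)

theorem pvModify_modify {κ ν : Type} [BEq κ] [LawfulBEq κ] (d : PySem.Dict κ (List ν))
    (k : κ) (f g : List ν → List ν) :
    (d.modify k [] f).modify k [] g = d.modify k [] (fun l => g (f l)) := by
  simp [PySem.Dict.modify, PySem.Dict.getD_insert_self, PySem.Dict.insert_insert_self]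

theorem pvApp_append {κ ν : Type} [BEq κ] [LawfulBEq κ] (k : κ) (d : PySem.Dict κ (List ν))
    (xs ys : List ν) : pvApp k (pvApp k d xs) ys = pvApp k d (xs ++ ys) := by
  rcases eq_or_ne xs [] with h | h
  · simp [h, pvApp]
  · rcases eq_or_ne ys [] with h' | h'
    · simp [h', pvApp]
    · have hxy : xs ++ ys ≠ [] := by simp [h]
      simp only [pvApp, if_neg h, if_neg h', if_neg hxy, pvModify_modify, List.append_assoc]

-- a fold that appends a (conditional) singleton per element is one pvApp of the filtered map
theorem pvFold_singleton {κ ν β : Type} [BEq κ] [LawfulBEq κ] (k : κ) (c : β → Bool)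
    (g : β → ν) (xs : List β) (d : PySem.Dict κ (List ν)) :
    xs.foldl (fun d x => if c x then d.modify k [] (fun l => l ++ [g x]) else d) d
      = pvApp k d ((xs.filter c).map g) := by
  induction xs generalizing d with
  | nil => simp [pvApp]
  | cons x xs ih =>
    by_cases hc : c x
    · have h1 : d.modify k [] (fun l => l ++ [g x]) = pvApp k d [g x] := by simp [pvApp]
      simp only [List.foldl_cons, h1, ih, pvApp_append, List.filter_cons, hc,
        if_pos, List.map_cons, List.singleton_append]
    · simp [hc, ih]

theorem pvFold_app {κ ν β : Type} [BEq κ] [LawfulBEq κ] (k : κ) (F : β → List ν)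
    (xs : List β) (d : PySem.Dict κ (List ν)) :
    xs.foldl (fun d x => pvApp k d (F x)) d = pvApp k d (xs.flatMap F) := by
  induction xs generalizing d with
  | nil => simp [pvApp]
  | cons x xs ih => simp [List.foldl_cons, ih, pvApp_append]

-- contains after a modify-grouping fold
theorem pvContains_fold {κ ν β : Type} [BEq κ] [LawfulBEq κ] (key : β → κ)
    (f : β → List ν → List ν) (l : List β) (d : PySem.Dict κ (List ν)) (c : κ) :
    (l.foldl (fun d p => d.modify (key p) [] (f p)) d).contains c
      = (d.contains c || l.any (fun p => key p == c)) := by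
  induction l generalizing d with
  | nil => simp
  | cons p l ih =>
    simp only [List.foldl_cons, ih, PySem.Dict.contains_modify, List.any_cons]
    cases h : (c == key p) <;> cases h2 : (key p == c) <;> simp_all [BEq.comm]

-- unconditional variant of pvFold_singleton
theorem pvFold_singleton' {κ ν β : Type} [BEq κ] [LawfulBEq κ] (k : κ) (g : β → ν)
    (xs : List β) (d : PySem.Dict κ (List ν)) :
    xs.foldl (fun d x => d.modify k [] (fun l => l ++ [g x])) d = pvApp k d (xs.map g) := by
  induction xs generalizing d with
  | nil => simp [pvApp]
  | cons x xs ih =>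
    have h1 : d.modify k [] (fun l => l ++ [g x]) = pvApp k d [g x] := by simp [pvApp]
    simp only [List.foldl_cons, h1, ih, pvApp_append, List.map_cons, List.singleton_append]

theorem pvApp_getD {κ ν : Type} [BEq κ] [LawfulBEq κ] [DecidableEq κ]
    (k c : κ) (d : PySem.Dict κ (List ν)) (xs : List ν) :
    (pvApp k d xs).getD c [] = if c = k then d.getD k [] ++ xs else d.getD c [] := by
  rcases eq_or_ne xs [] with h | h
  · subst h
    by_cases hck : c = k
    · subst hck; simp [pvApp]
    · simp [pvApp, hck]
  · simp [pvApp, h, PySem.Dict.getD_modify]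

theorem pvApp_contains {κ ν : Type} [BEq κ] [LawfulBEq κ]
    (k c : κ) (d : PySem.Dict κ (List ν)) (xs : List ν) :
    (pvApp k d xs).contains c = (d.contains c || (c == k && decide (xs ≠ []))) := by
  rcases eq_or_ne xs [] with h | h
  · simp [pvApp, h]
  · simp [pvApp, h, PySem.Dict.contains_modify, Bool.or_comm]

-- getD / contains of a keyed pvApp fold (pbs on the B side)
theorem pvFoldApp_getD {κ ν β : Type} [BEq κ] [LawfulBEq κ] [DecidableEq κ] (key : β → κ)
    (Q : β → List ν) (l : List β) (d : PySem.Dict κ (List ν)) (c : κ) :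
    (l.foldl (fun d e => pvApp (key e) d (Q e)) d).getD c []
      = d.getD c [] ++ (l.filter (fun e => key e == c)).flatMap Q := by
  induction l generalizing d with
  | nil => simp
  | cons e l ih =>
    simp only [List.foldl_cons, ih, pvApp_getD, List.filter_cons]
    by_cases h : key e = c
    · simp [h]
    · have h1 : (key e == c) = false := by simp [h]
      have h2 : ¬ c = key e := fun hh => h hh.symm
      simp [h1, h2]

theorem pvFoldApp_contains {κ ν β : Type} [BEq κ] [LawfulBEq κ] (key : β → κ)
    (Q : β → List ν) (l : List β) (d : PySem.Dict κ (List ν)) (c : κ) :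
    (l.foldl (fun d e => pvApp (key e) d (Q e)) d).contains c
      = (d.contains c || decide ((l.filter (fun e => key e == c)).flatMap Q ≠ [])) := by
  induction l generalizing d with
  | nil => simp
  | cons e l ih =>
    by_cases h : key e = c
    · subst h
      rw [List.foldl_cons, ih, pvApp_contains,
        List.filter_cons_of_pos (by simp), List.flatMap_cons]
      by_cases hq : Q e = []
      · rw [hq, List.nil_append]; simp
      · have hne : Q e ++ List.flatMap Q (List.filter (fun x => key x == key e) l) ≠ [] :=
          fun hh => hq (List.append_eq_nil_iff.mp hh).1
        simp [hne, hq, Bool.or_comm]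
    · rw [List.foldl_cons, ih, pvApp_contains,
        List.filter_cons_of_neg (by simp [h])]
      have h2 : (c == key e) = false := beq_eq_false_iff_ne.mpr (Ne.symm h)
      simp [h2]

-- A's adjacency[m], as a list
def pvAdjL (edge_types : List (String × String × String)) (m : String) : List (String × String) :=
  (edge_types.filter (fun e => e.1 == m)).map (fun e => e.2)

-- the list of metapath strings produced for start type nt (A's shape)
def pvP (edge_types : List (String × String × String)) (nt : String) : List String :=
  (edge_types.filter (fun e => e.1 == nt)).flatMap (fun e =>
    ((pvAdjL edge_types e.2.2).filter (fun p2 => p2.2 == nt)).map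
      (fun p2 => nt ++ e.2.1 ++ e.2.2 ++ p2.1 ++ p2.2))

def pvAdj (edge_types : List (String × String × String)) :
    PySem.Dict String (List (String × String)) :=
  edge_types.foldl (fun d e => d.modify e.1 [] (fun l => l ++ [e.2])) PySem.Dict.empty

def pvBack (edge_types : List (String × String × String)) :
    PySem.Dict (String × String) (List String) :=
  (edge_types.map (fun e => ((e.1, e.2.2), e.2.1))).foldl
    (fun d p => d.modify p.1 [] (fun l => l ++ [p.2])) PySem.Dict.empty

-- the strings B emits for one edge e
def pvQ (edge_types : List (String × String × String)) (e : String × String × String) :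
    List String :=
  ((pvBack edge_types).getD (e.2.2, e.1) []).map
    (fun rel2 => e.1 ++ e.2.1 ++ e.2.2 ++ rel2 ++ e.1)

theorem pvAdj_getD (ets : List (String × String × String)) (c : String) :
    (pvAdj ets).getD c [] = pvAdjL ets c := by
  unfold pvAdj pvAdjL
  rw [PySem.Dict.getD_foldl_modify_append]
  simp

theorem pvAdj_contains (ets : List (String × String × String)) (c : String) :
    (pvAdj ets).contains c = ets.any (fun e => e.1 == c) := by
  unfold pvAdj
  simpa using pvContains_fold (key := fun (e : String × String × String) => e.1)
    (f := fun e l => l ++ [e.2]) ets PySem.Dict.empty c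

theorem pvBack_getD (ets : List (String × String × String)) (a b : String) :
    (pvBack ets).getD (a, b) []
      = (ets.filter (fun e => (e.1, e.2.2) == (a, b))).map (fun e => e.2.1) := by
  unfold pvBack
  rw [PySem.Dict.getD_foldl_modify_append]
  simp [List.filter_map, Function.comp_def]

-- B's per-start-type path list
def pvPB (edge_types : List (String × String × String)) (nt : String) : List String :=
  (edge_types.filter (fun e => e.1 == nt)).flatMap (pvQ edge_types)

-- B's paths_by_start dict
def pvPBS (edge_types : List (String × String × String)) :
    PySem.Dict String (List String) :=
  edge_types.foldl (fun d e =>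
    ((pvBack edge_types).getD (e.2.2, e.1) []).foldl (fun d rel2 =>
      d.modify e.1 [] (fun l => l ++ [e.1 ++ e.2.1 ++ e.2.2 ++ rel2 ++ e.1])) d)
    PySem.Dict.empty

theorem pvAdjL_eq_nil_of_not_contains (ets : List (String × String × String)) (c : String)
    (h : ¬ (pvAdj ets).contains c = true) : pvAdjL ets c = [] := by
  have h0 : ets.any (fun e => e.1 == c) = false := by
    rw [← pvAdj_contains]; exact Bool.not_eq_true _ ▸ Bool.eq_false_iff.mpr h
  unfold pvAdjL
  rw [List.filter_eq_nil_iff.mpr (by simpa using List.any_eq_false.mp h0)]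
  simp

-- one iteration of A's outer loop appends exactly pvP nt
theorem pvStepA (ets : List (String × String × String))
    (m : PySem.Dict String (List String)) (nt : String) :
    (if (pvAdj ets).contains nt then
      ((pvAdj ets).getD nt []).foldl (fun m p1 =>
        if (pvAdj ets).contains p1.2 then
          ((pvAdj ets).getD p1.2 []).foldl (fun m p2 =>
            if p2.2 == nt then
              m.modify nt [] (fun l => l ++ [nt ++ p1.1 ++ p1.2 ++ p2.1 ++ p2.2])
            else m) m
        else m) m
     else m) = pvApp nt m (pvP ets nt) := by
  have hinner : ∀ (m : PySem.Dict String (List String)) (e : String × String × String),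
      (if (pvAdj ets).contains e.2.2 then
        ((pvAdj ets).getD e.2.2 []).foldl (fun m p2 =>
          if p2.2 == nt then
            m.modify nt [] (fun l => l ++ [nt ++ e.2.1 ++ e.2.2 ++ p2.1 ++ p2.2])
          else m) m
       else m)
      = pvApp nt m (((pvAdjL ets e.2.2).filter (fun p2 => p2.2 == nt)).map
          (fun p2 => nt ++ e.2.1 ++ e.2.2 ++ p2.1 ++ p2.2)) := by
    intro m e
    by_cases hc : (pvAdj ets).contains e.2.2
    · rw [if_pos hc, pvAdj_getD]
      exact pvFold_singleton nt (fun p2 => p2.2 == nt)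
        (fun p2 => nt ++ e.2.1 ++ e.2.2 ++ p2.1 ++ p2.2) (pvAdjL ets e.2.2) m
    · rw [if_neg hc, pvAdjL_eq_nil_of_not_contains ets e.2.2 hc]
      simp [pvApp]
  by_cases hnt : (pvAdj ets).contains nt
  · rw [if_pos hnt, pvAdj_getD]
    unfold pvAdjL
    rw [List.foldl_map]
    have hstep : (fun (m : PySem.Dict String (List String)) (e : String × String × String) =>
        (if (pvAdj ets).contains e.2.2 then
          ((pvAdj ets).getD e.2.2 []).foldl (fun m p2 =>
            if p2.2 == nt then
              m.modify nt [] (fun l => l ++ [nt ++ e.2.1 ++ e.2.2 ++ p2.1 ++ p2.2])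
            else m) m
         else m))
        = fun m e => pvApp nt m (((pvAdjL ets e.2.2).filter (fun p2 => p2.2 == nt)).map
            (fun p2 => nt ++ e.2.1 ++ e.2.2 ++ p2.1 ++ p2.2)) :=
      funext fun m => funext fun e => hinner m e
    show List.foldl (fun (m : PySem.Dict String (List String)) (e : String × String × String) =>
        (if (pvAdj ets).contains e.2.2 then
          ((pvAdj ets).getD e.2.2 []).foldl (fun m p2 =>
            if p2.2 == nt then
              m.modify nt [] (fun l => l ++ [nt ++ e.2.1 ++ e.2.2 ++ p2.1 ++ p2.2])
            else m) m
         else m)) m (ets.filter (fun e => e.1 == nt)) = _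
    rw [hstep]
    rw [pvFold_app nt (fun e => ((pvAdjL ets e.2.2).filter (fun p2 => p2.2 == nt)).map
      (fun p2 => nt ++ e.2.1 ++ e.2.2 ++ p2.1 ++ p2.2)) (ets.filter (fun e => e.1 == nt)) m]
    rfl
  · rw [if_neg hnt]
    have h1 : ets.filter (fun e => e.1 == nt) = [] := by
      have := pvAdjL_eq_nil_of_not_contains ets nt hnt
      unfold pvAdjL at this
      exact List.map_eq_nil_iff.mp (by exact this) |>.symm ▸ rfl
    unfold pvP
    rw [h1]
    simp [pvApp]

theorem pvPBS_conv (ets : List (String × String × String)) :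
    pvPBS ets = ets.foldl (fun d e => pvApp e.1 d (pvQ ets e)) PySem.Dict.empty := by
  unfold pvPBS
  congr 1
  funext d e
  exact pvFold_singleton' e.1 (fun rel2 => e.1 ++ e.2.1 ++ e.2.2 ++ rel2 ++ e.1)
    ((pvBack ets).getD (e.2.2, e.1) []) d

theorem pvPBS_getD (ets : List (String × String × String)) (nt : String) :
    (pvPBS ets).getD nt [] = pvPB ets nt := by
  rw [pvPBS_conv]
  have := pvFoldApp_getD (key := fun (e : String × String × String) => e.1)
    (Q := pvQ ets) ets PySem.Dict.empty nt
  simpa [pvPB] using this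

theorem pvPBS_contains (ets : List (String × String × String)) (nt : String) :
    (pvPBS ets).contains nt = decide (pvPB ets nt ≠ []) := by
  rw [pvPBS_conv]
  have := pvFoldApp_contains (key := fun (e : String × String × String) => e.1)
    (Q := pvQ ets) ets PySem.Dict.empty nt
  simpa [pvPB] using this

-- one iteration of B's result loop appends exactly pvPB nt
theorem pvStepB (ets : List (String × String × String))
    (m : PySem.Dict String (List String)) (nt : String) :
    (if (pvPBS ets).contains nt then
      m.modify nt [] (fun l => l ++ (pvPBS ets).getD nt [])
     else m) = pvApp nt m (pvPB ets nt) := by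
  by_cases hp : pvPB ets nt = []
  · rw [if_neg (by simp [pvPBS_contains, hp]), hp]
    simp [pvApp]
  · rw [if_pos (by simp [pvPBS_contains, hp]), pvPBS_getD]
    simp [pvApp, hp]

-- the two per-start-type path lists coincide
theorem pvP_eq_pvPB (ets : List (String × String × String)) (nt : String) :
    pvP ets nt = pvPB ets nt := by
  unfold pvP pvPB
  rw [List.flatMap_def, List.flatMap_def]
  refine congrArg List.flatten (List.map_congr_left ?_)
  intro e he
  have h1 : e.1 = nt := by simpa using (List.mem_filter.mp he).2
  unfold pvQ pvAdjL
  rw [pvBack_getD, h1, List.filter_map, List.map_map, List.map_map]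
  have hfil : List.filter ((fun p2 => p2.2 == nt) ∘ fun e => e.2) (List.filter (fun e' => e'.1 == e.2.2) ets)
      = ets.filter (fun e' => (e'.1, e'.2.2) == (e.2.2, nt)) := by
    rw [List.filter_filter]
    refine List.filter_congr ?_
    intro e' _
    show ((e'.2.2 == nt) && (e'.1 == e.2.2)) = ((e'.1, e'.2.2) == (e.2.2, nt))
    rw [show ((e'.1, e'.2.2) == (e.2.2, nt)) = ((e'.1 == e.2.2) && (e'.2.2 == nt)) from rfl]
    exact Bool.and_comm _ _
  rw [hfil]
  refine List.map_congr_left ?_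
  intro e' he'
  have h2 : e'.2.2 = nt := by
    have := (List.mem_filter.mp he').2
    have hp : e'.1 = e.2.2 ∧ e'.2.2 = nt := by simpa [Prod.ext_iff] using this
    exact hp.2
  simp [Function.comp, h2]

theorem pvA_eq (nts : List String) (ets : List (String × String × String)) :
    generate_metapaths nts ets
      = (nts.foldl (fun m nt => pvApp nt m (pvP ets nt)) PySem.Dict.empty).items :=
  congrArg (fun f => (List.foldl f PySem.Dict.empty nts).items)
    (funext fun m => funext fun nt => pvStepA ets m nt)

theorem pvB_eq (nts : List String) (ets : List (String × String × String)) :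
    generate_metapaths_alt nts ets
      = (nts.foldl (fun m nt => pvApp nt m (pvPB ets nt)) PySem.Dict.empty).items :=
  congrArg (fun f => (List.foldl f PySem.Dict.empty nts).items)
    (funext fun m => funext fun nt => pvStepB ets m nt)

-- ===== VERDICT (by name: the statement is the Claim_ definition above) =====
theorem generate_metapaths_spec : Claim_equal_generate_metapaths := by
  intro nts ets _
  unfold Spec_generate_metapaths
  rw [pvA_eq, pvB_eq]
  refine congrArg PySem.Dict.items
    (congrFun (congrArg (fun f => List.foldl f PySem.Dict.empty) ?_) nts)
  funext m nt
  rw [pvP_eq_pvPB]
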